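-- pv_equiv track=rewrite | github.com/kaku-highball-village-tree/tsucrea-manhour-alloc_11 | src/PL_CsvToTsv_Cmd_0002.py | build_cumulative_subject_order
-- ===== SOURCE A (Python) =====
-- from typing import Dict, List, Optional, Tuple
--
-- def build_cumulative_subject_order(objSubjectLists: List[List[str]]) -> List[str]:
--     objOrderedSubjects: List[str] = []
--     for objSubjectList in objSubjectLists:
--         iInsertAfterIndex: int = -1
--         for pszSubject in objSubjectList:
--             if pszSubject in objOrderedSubjects:
--                 iInsertAfterIndex = objOrderedSubjects.index(pszSubject)
--                 continue
--             objOrderedSubjects.insert(iInsertAfterIndex + 1, pszSubject)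
--             iInsertAfterIndex += 1
--     return objOrderedSubjects
-- ===== SOURCE B (Python) =====
-- def build_cumulative_subject_order(objSubjectLists):
--     # Singly-linked list encoded as a next-pointer dict (None = head sentinel):
--     # O(1) membership and O(1) insert-after-anchor instead of A's O(n) scans.
--     nxt = {None: None}
--     for objSubjectList in objSubjectLists:
--         anchor = None
--         for pszSubject in objSubjectList:
--             if pszSubject in nxt:
--                 anchor = pszSubject
--             else:
--                 nxt[pszSubject] = nxt[anchor]
--                 nxt[anchor] = pszSubject
--                 anchor = pszSubject
--     out = []
--     cur = nxt[None]
--     while cur is not None: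
--         out.append(cur)
--         cur = nxt[cur]
--     return out
-- ===== Notes on version B (the rewrite author's own statement) =====
-- stated objective: faster
-- what changed: Replaces A's O(n) list membership tests, .index scans and middle-of-list inserts with a next-pointer dict encoding a singly linked list (O(1) membership and O(1) insert-after-anchor), then walks the chain once to emit the order.
import Mathlib
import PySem

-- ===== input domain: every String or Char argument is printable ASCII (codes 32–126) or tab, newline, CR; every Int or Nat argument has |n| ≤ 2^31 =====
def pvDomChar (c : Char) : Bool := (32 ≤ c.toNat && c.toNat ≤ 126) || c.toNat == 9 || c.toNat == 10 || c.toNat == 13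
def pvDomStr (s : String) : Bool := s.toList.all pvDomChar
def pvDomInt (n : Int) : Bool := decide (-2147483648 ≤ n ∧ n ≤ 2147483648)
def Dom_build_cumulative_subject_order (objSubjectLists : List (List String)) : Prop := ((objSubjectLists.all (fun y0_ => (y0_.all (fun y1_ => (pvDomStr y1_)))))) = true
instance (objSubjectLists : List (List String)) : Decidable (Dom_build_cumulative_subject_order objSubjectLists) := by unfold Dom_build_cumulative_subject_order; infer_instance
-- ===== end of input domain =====

-- B replaces A's quadratic list-scans/inserts by a next-pointer dict (a singly linked
-- list with O(1) membership and O(1) insert-after-anchor); same return value everywhere.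

-- ===== PORT A =====
-- inner-loop body of A: state = (objOrderedSubjects, iInsertAfterIndex)
def aStep (st : List String × Int) (pszSubject : String) : List String × Int :=
  if st.1.contains pszSubject then
    -- pszSubject ∈ list, so .index cannot raise; index? is some here
    (st.1, (((PySem.List.index? st.1 pszSubject).getD 0 : Nat) : Int))
  else
    (PySem.List.insert st.1 (st.2 + 1) pszSubject, st.2 + 1)

def build_cumulative_subject_order (objSubjectLists : List (List String)) : List String :=
  objSubjectLists.foldl
    (fun objOrderedSubjects objSubjectList => (objSubjectList.foldl aStep (objOrderedSubjects, -1)).1)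
    []

-- ===== PORT B =====
-- inner-loop body of B: state = (nxt, anchor); the dict key none is Python's None head sentinel
def bStep (st : PySem.Dict (Option String) (Option String) × Option String) (pszSubject : String) :
    PySem.Dict (Option String) (Option String) × Option String :=
  if st.1.contains (some pszSubject) then
    (st.1, some pszSubject)
  else
    -- anchor is always a key of nxt, so Python's nxt[anchor] cannot raise; getD is exact here
    ((st.1.insert (some pszSubject) (st.1.getD st.2 none)).insert st.2 (some pszSubject), some pszSubject)

-- the final while-loop of B; fuel = dict size bounds the chain length (the chain is acyclic)
def bWalk (nxt : PySem.Dict (Option String) (Option String)) : Nat → Option String → List String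
  | _, none => []
  | 0, some _ => []
  | f + 1, some s => s :: bWalk nxt f (nxt.getD (some s) none)

def build_cumulative_subject_order_alt (objSubjectLists : List (List String)) : List String :=
  let nxt := objSubjectLists.foldl
    (fun nxt objSubjectList => (objSubjectList.foldl bStep (nxt, none)).1)
    (PySem.Dict.ofList [((none : Option String), (none : Option String))])
  bWalk nxt nxt.size (nxt.getD none none)

-- ===== PRECONDITION & SPEC =====
def Spec_build_cumulative_subject_order (objSubjectLists : List (List String)) (out : List String) : Prop := out = build_cumulative_subject_order_alt objSubjectLists
instance (objSubjectLists : List (List String)) (out : List String) : Decidable (Spec_build_cumulative_subject_order objSubjectLists out) := by unfold Spec_build_cumulative_subject_order; infer_instance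

-- ===== CLAIM (what is proved, stated in full; the proofs are below) =====
def Claim_equal_build_cumulative_subject_order : Prop := ∀ (objSubjectLists : List (List String)), Dom_build_cumulative_subject_order objSubjectLists → Spec_build_cumulative_subject_order objSubjectLists (build_cumulative_subject_order objSubjectLists)

-- ===== LEMMAS AND PROOFS =====

-- element after the FIRST occurrence of s in l (none if s absent or last)
def nextAfter (l : List String) (s : String) : Option String :=
  match l with
  | [] => none
  | a :: rest => if a = s then rest.head? else nextAfter rest s

-- simulation invariant: the dict nxt encodes exactly the ordered list ord
def SimInv (ord : List String) (nxt : PySem.Dict (Option String) (Option String)) : Prop :=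
  ord.Nodup ∧
  nxt.get? none = some ord.head? ∧
  (∀ s : String, nxt.get? (some s) = if s ∈ ord then some (nextAfter ord s) else none) ∧
  nxt.size = ord.length + 1

-- anchor relation: A's index i and B's anchor a name the same position of ord
def AnchRel (ord : List String) (i : Int) (a : Option String) : Prop :=
  (a = none ∧ i = -1) ∨
  ∃ pre rest u, a = some u ∧ ord = pre ++ u :: rest ∧ u ∉ pre ∧ i = (pre.length : Int)

theorem nextAfter_cons_ne (a : String) (l : List String) (t : String) (h : a ≠ t) :
    nextAfter (a :: l) t = nextAfter l t := by
  simp [nextAfter, h]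

theorem nextAfter_append_cons (pre rest : List String) (s : String) (h : s ∉ pre) :
    nextAfter (pre ++ s :: rest) s = rest.head? := by
  induction pre with
  | nil => simp [nextAfter]
  | cons a pre ih =>
    have ha : a ≠ s := fun he => h (he ▸ List.mem_cons_self)
    rw [List.cons_append, nextAfter_cons_ne a _ s ha]
    exact ih (fun hm => h (List.mem_cons_of_mem a hm))

theorem head?_append_cons (pre X Y : List String) (u : String) :
    (pre ++ u :: X).head? = (pre ++ u :: Y).head? := by
  cases pre <;> simp

theorem nextAfter_mid (pre rest : List String) (u s t : String) (htu : t ≠ u) (hts : t ≠ s) :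
    nextAfter (pre ++ u :: s :: rest) t = nextAfter (pre ++ u :: rest) t := by
  induction pre with
  | nil =>
    simp only [List.nil_append]
    rw [nextAfter_cons_ne u _ t htu.symm, nextAfter_cons_ne u _ t htu.symm,
        nextAfter_cons_ne s _ t hts.symm]
  | cons a pre ih =>
    by_cases hat : a = t
    · subst hat
      simp only [List.cons_append, nextAfter, if_pos]
      exact head?_append_cons pre _ _ u
    · rw [List.cons_append, List.cons_append, nextAfter_cons_ne a _ t (fun h => hat h),
          nextAfter_cons_ne a _ t (fun h => hat h)]
      exact ih

theorem nodup_mid (pre rest : List String) (u s : String)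
    (h : (pre ++ u :: rest).Nodup) (hs : s ∉ pre ++ u :: rest) :
    (pre ++ u :: s :: rest).Nodup := by
  have hp : List.Perm ((pre ++ [u]) ++ s :: rest) (s :: ((pre ++ [u]) ++ rest)) := List.perm_middle
  have h2 : (s :: ((pre ++ [u]) ++ rest)).Nodup :=
    List.Nodup.cons (by simpa using hs) (by simpa using h)
  simpa using hp.symm.nodup h2

theorem notMem_pre_of_nodup (pre rest : List String) (s : String)
    (h : (pre ++ s :: rest).Nodup) : s ∉ pre := by
  have hd := List.nodup_append.mp h
  intro hm
  have h3 := hd.2.2 s hm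
  simp at h3

theorem step_sim (ord : List String) (i : Int) (a : Option String)
    (nxt : PySem.Dict (Option String) (Option String)) (s : String)
    (hI : SimInv ord nxt) (hA : AnchRel ord i a) :
    SimInv (aStep (ord, i) s).1 (bStep (nxt, a) s).1 ∧
      AnchRel (aStep (ord, i) s).1 (aStep (ord, i) s).2 (bStep (nxt, a) s).2 := by
  obtain ⟨hnd, hnone, hsome, hsize⟩ := hI
  by_cases hmem : s ∈ ord
  · -- subject already present: both sides only move the anchor
    have hcA : ord.contains s = true := by simpa using hmem
    have hcB : nxt.contains (some s) = true := by
      rw [PySem.Dict.contains_eq_isSome_get?, hsome s, if_pos hmem]; rfl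
    obtain ⟨k, hk⟩ := Option.isSome_iff_exists.mp
      ((PySem.List.index?_isSome_iff ord s).mpr hmem)
    obtain ⟨pre, suf, hdec, hlen, hpre⟩ := (PySem.List.index?_eq_some_iff ord s k).mp hk
    simp only [aStep, bStep, hcA, hcB, if_pos]
    refine ⟨⟨hnd, hnone, hsome, hsize⟩, Or.inr ⟨pre, suf, s, rfl, hdec, hpre, ?_⟩⟩
    rw [PySem.List.index?_eq_idxOf?] at hk
    simp [hk, hlen]
  · -- new subject: insert after the anchor
    have hcA : ord.contains s = false := by simpa using hmem
    have hcB : nxt.contains (some s) = false := by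
      rw [PySem.Dict.contains_eq_isSome_get?, hsome s, if_neg hmem]; rfl
    simp only [aStep, bStep, hcA, hcB, Bool.false_eq_true, if_false]
    rcases hA with ⟨ha, hi⟩ | ⟨pre, rest, u, ha, hdec, hupre, hi⟩
    · -- anchor = head sentinel: prepend
      subst ha; subst hi
      have hins : PySem.List.insert ord (-1 + 1) s = s :: ord := by
        norm_num [PySem.List.insert_zero]
      have hgd : nxt.getD none none = ord.head? := by
        rw [PySem.Dict.getD_eq_get?_getD, hnone]; rfl
      simp only [hins, hgd]
      refine ⟨⟨List.Nodup.cons hmem hnd, ?_, ?_, ?_⟩, Or.inr ⟨[], ord, s, rfl, by simp, by simp, by norm_num⟩⟩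
      · rw [PySem.Dict.get?_insert_self]; simp
      · intro t
        by_cases hts : t = s
        · subst hts
          rw [PySem.Dict.get?_insert_of_ne _ _ (by simp), PySem.Dict.get?_insert_self]
          simp [nextAfter]
        · rw [PySem.Dict.get?_insert_of_ne _ _ (by simp),
              PySem.Dict.get?_insert_of_ne _ _ (by simpa using hts), hsome t,
              nextAfter_cons_ne s ord t (fun h => hts h.symm)]
          simp [hts]
      · rw [PySem.Dict.size_insert, PySem.Dict.size_insert]
        have h1 : (nxt.insert (some s) ord.head?).contains none = true := by
          rw [PySem.Dict.contains_insert, PySem.Dict.contains_eq_isSome_get?, hnone]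
          simp
        rw [if_pos h1, if_neg (by simp [hcB]), hsize]
        simp
    · -- anchor = some u at position pre.length: insert right after u
      subst ha; subst hi; subst hdec
      have hslen : s ∉ pre := fun h => hmem (by simp [h])
      have hsu : s ≠ u := fun h => hmem (by simp [h])
      have hins : PySem.List.insert (pre ++ u :: rest) ((pre.length : Int) + 1) s
          = pre ++ u :: s :: rest := by
        have hcast : ((pre.length : Int) + 1) = ((pre.length + 1 : Nat) : Int) := by push_cast; ring
        rw [hcast, PySem.List.insert_natCast _ _ _ (by simp)]
        have hto : (pre ++ u :: rest).take (pre.length + 1) = pre ++ [u] := by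
          have : pre ++ u :: rest = (pre ++ [u]) ++ rest := by simp
          rw [this, List.take_left' (by simp)]
        have hdr : (pre ++ u :: rest).drop (pre.length + 1) = rest := by
          have : pre ++ u :: rest = (pre ++ [u]) ++ rest := by simp
          rw [this, List.drop_left' (by simp)]
        rw [hto, hdr]; simp
      have hgd : nxt.getD (some u) none = rest.head? := by
        rw [PySem.Dict.getD_eq_get?_getD, hsome u, if_pos (by simp),
            nextAfter_append_cons pre rest u hupre]; rfl
      simp only [hins, hgd]
      refine ⟨⟨nodup_mid pre rest u s hnd hmem, ?_, ?_, ?_⟩,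
        Or.inr ⟨pre ++ [u], rest, s, rfl, by simp, ?_, by simp⟩⟩
      · rw [PySem.Dict.get?_insert_of_ne _ _ (by simp), PySem.Dict.get?_insert_of_ne _ _ (by simp),
            hnone, head?_append_cons pre (s :: rest) rest u]
      · intro t
        by_cases htu : t = u
        · subst htu
          rw [PySem.Dict.get?_insert_self]
          have : nextAfter (pre ++ t :: s :: rest) t = some s := by
            rw [nextAfter_append_cons pre (s :: rest) t hupre]; rfl
          simp [this]
        · rw [PySem.Dict.get?_insert_of_ne _ _ (by simpa using htu)]
          by_cases hts : t = s
          · subst hts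
            rw [PySem.Dict.get?_insert_self]
            have : nextAfter (pre ++ u :: t :: rest) t = rest.head? := by
              have : pre ++ u :: t :: rest = (pre ++ [u]) ++ t :: rest := by simp
              rw [this, nextAfter_append_cons (pre ++ [u]) rest t (by simp [hslen, Ne.symm, hsu])]
            simp [this]
          · rw [PySem.Dict.get?_insert_of_ne _ _ (by simpa using hts), hsome t,
                nextAfter_mid pre rest u s t htu hts]
            have : (t ∈ pre ++ u :: s :: rest) ↔ (t ∈ pre ++ u :: rest) := by
              simp [hts]
            simp only [List.mem_append, List.mem_cons] at this ⊢
            rw [if_congr this rfl rfl]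
      · rw [PySem.Dict.size_insert, PySem.Dict.size_insert]
        have h1 : (nxt.insert (some s) rest.head?).contains (some u) = true := by
          rw [PySem.Dict.contains_insert, PySem.Dict.contains_eq_isSome_get?, hsome u,
              if_pos (by simp)]
          simp
        rw [if_pos h1, if_neg (by simp [hcB]), hsize]
        simp
        omega
      · have : u ∈ pre ++ u :: rest := by simp
        simp [hslen, hsu]

theorem fold_sim (lst : List String) :
    ∀ (stA : List String × Int) (stB : PySem.Dict (Option String) (Option String) × Option String),
      SimInv stA.1 stB.1 → AnchRel stA.1 stA.2 stB.2 →
      SimInv (lst.foldl aStep stA).1 (lst.foldl bStep stB).1 ∧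
        AnchRel (lst.foldl aStep stA).1 (lst.foldl aStep stA).2 (lst.foldl bStep stB).2 := by
  induction lst with
  | nil => exact fun stA stB hI hA => ⟨hI, hA⟩
  | cons s t ih =>
    intro stA stB hI hA
    obtain ⟨hI', hA'⟩ := step_sim stA.1 stA.2 stB.2 stB.1 s hI hA
    simpa using ih (aStep stA s) (bStep stB s) hI' hA'

theorem outer_sim (ls : List (List String)) :
    ∀ (ord : List String) (nxt : PySem.Dict (Option String) (Option String)),
      SimInv ord nxt →
      SimInv (ls.foldl (fun o l => (l.foldl aStep (o, -1)).1) ord)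
        (ls.foldl (fun d l => (l.foldl bStep (d, none)).1) nxt) := by
  induction ls with
  | nil => exact fun ord nxt h => h
  | cons l t ih =>
    intro ord nxt hI
    exact ih _ _ (fold_sim l (ord, -1) (nxt, none) hI (Or.inl ⟨rfl, rfl⟩)).1

theorem init_sim : SimInv [] (PySem.Dict.ofList [((none : Option String), (none : Option String))]) := by
  refine ⟨List.nodup_nil, rfl, fun s => ?_, rfl⟩
  rfl

theorem walk_eq (suf : List String) :
    ∀ (pre : List String) (nxt : PySem.Dict (Option String) (Option String))
      (ord : List String) (fuel : Nat),
      SimInv ord nxt → ord = pre ++ suf → suf.length ≤ fuel →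
      bWalk nxt fuel suf.head? = suf := by
  induction suf with
  | nil =>
    intro pre nxt ord fuel _ _ _
    cases fuel <;> rfl
  | cons s rest ih =>
    intro pre nxt ord fuel hI hdec hfuel
    obtain ⟨hnd, hnone, hsome, hsize⟩ := hI
    cases fuel with
    | zero => simp at hfuel
    | succ f =>
      have hmem : s ∈ ord := by simp [hdec]
      have hnp : s ∉ pre := notMem_pre_of_nodup pre rest s (hdec ▸ hnd)
      have hgd : nxt.getD (some s) none = rest.head? := by
        rw [PySem.Dict.getD_eq_get?_getD, hsome s, if_pos hmem, hdec,
            nextAfter_append_cons pre rest s hnp]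
        rfl
      show s :: bWalk nxt f (nxt.getD (some s) none) = s :: rest
      rw [hgd, ih (pre ++ [s]) nxt ord f ⟨hnd, hnone, hsome, hsize⟩ (by simp [hdec]) (by simpa using hfuel)]

-- ===== VERDICT (by name: the statement is the Claim_ definition above) =====
theorem build_cumulative_subject_order_spec : Claim_equal_build_cumulative_subject_order := by
  intro ls _
  unfold Spec_build_cumulative_subject_order build_cumulative_subject_order build_cumulative_subject_order_alt
  have hI := outer_sim ls [] (PySem.Dict.ofList [((none : Option String), (none : Option String))]) init_sim
  set ord := ls.foldl (fun o l => (l.foldl aStep (o, -1)).1) [] with hord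
  set nxt := ls.foldl (fun d l => (l.foldl bStep (d, none)).1)
    (PySem.Dict.ofList [((none : Option String), (none : Option String))]) with hnxt
  obtain ⟨hnd, hnone, hsome, hsize⟩ := hI
  have hgd : nxt.getD none none = ord.head? := by
    rw [PySem.Dict.getD_eq_get?_getD, hnone]; rfl
  show ord = bWalk nxt nxt.size (nxt.getD none none)
  rw [hgd]
  exact (walk_eq ord [] nxt ord nxt.size ⟨hnd, hnone, hsome, hsize⟩ (by simp) (by rw [hsize]; omega)).symm
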